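-- pv_equiv track=rewrite | github.com/Rblea97/password-security-toolkit | src/securepass/utils/patterns.py | has_common_pattern
-- ===== SOURCE A (Python) =====
-- from typing import List
--
-- COMMON_PATTERNS: List[str] = [
--     "password",
--     "123456",
--     "qwerty",
--     "abc123",
--     "letmein",
--     "welcome",
--     "monkey",
--     "dragon",
--     "master",
--     "admin",
--     "login",
--     "passw0rd",
--     "password1",
--     "123456789",
--     "12345678",
--     "iloveyou",
--     "princess",
--     "trustno1",
--     "superman",
--     "baseball",
-- ]
--
-- def has_common_pattern(password: str) -> bool:
--     """
--     Check if password contains a common weak pattern.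
--
--     Compares against a list of well-known weak passwords
--     and common patterns (case-insensitive).
--
--     Args:
--         password: The password to check
--
--     Returns:
--         True if password contains a common pattern, False otherwise
--
--     Examples:
--         >>> has_common_pattern("password123")
--         True
--         >>> has_common_pattern("MySecureP@ss")
--         False
--     """
--     if not password:
--         return False
--
--     password_lower = password.lower()
--
--     # Check if password contains any common pattern
--     for pattern in COMMON_PATTERNS:
--         if pattern in password_lower:
--             return True
--
--     return False
-- ===== SOURCE B (Python) =====
-- from typing import Dict, List
--
-- COMMON_PATTERNS: List[str] = [
--     "password", "123456", "qwerty", "abc123", "letmein", "welcome", "monkey",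
--     "dragon", "master", "admin", "login", "passw0rd", "password1", "123456789",
--     "12345678", "iloveyou", "princess", "trustno1", "superman", "baseball",
-- ]
--
-- # Built once: bucket the patterns by their first character; each bucket holds
-- # the pattern tails (the pattern minus its first character).
-- _FIRST_INDEX: Dict[str, List[str]] = {}
-- for _pat in COMMON_PATTERNS:
--     _FIRST_INDEX.setdefault(_pat[0], []).append(_pat[1:])
--
-- def has_common_pattern(password: str) -> bool:
--     # Single text-major scan: at each position look up the current character's
--     # bucket in the precomputed index and test only those pattern tails there;
--     # the per-position scan over the whole pattern list disappears.
--     p = password.lower()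
--     for i, c in enumerate(p):
--         for tail in _FIRST_INDEX.get(c, []):
--             if p.startswith(tail, i + 1):
--                 return True
--     return False
-- ===== Notes on version B (the rewrite author's own statement) =====
-- stated objective: alternative
-- what changed: Replaces A's pattern-major loop of per-pattern substring searches with a first-character bucket index (a dict from char to pattern tails, built once) driving a single text-major scan: at each position only the current character's bucket is consulted, so the per-position scan over the whole pattern list disappears.
import Mathlib
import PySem

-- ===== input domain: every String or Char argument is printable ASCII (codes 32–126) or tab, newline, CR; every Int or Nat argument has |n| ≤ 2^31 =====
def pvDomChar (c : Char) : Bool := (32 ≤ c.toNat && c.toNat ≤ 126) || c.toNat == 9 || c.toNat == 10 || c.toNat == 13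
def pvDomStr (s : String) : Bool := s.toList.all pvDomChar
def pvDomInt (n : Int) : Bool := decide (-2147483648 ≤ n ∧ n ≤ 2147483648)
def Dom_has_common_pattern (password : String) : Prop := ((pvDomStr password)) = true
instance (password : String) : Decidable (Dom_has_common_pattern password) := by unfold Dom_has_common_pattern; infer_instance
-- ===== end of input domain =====

-- B replaces A's pattern-major loop of substring searches by a first-character bucket
-- index (built once) driving one text-major scan (alternative decomposition).

def pvCommonPatterns : List String :=
  ["password", "123456", "qwerty", "abc123", "letmein", "welcome", "monkey",
   "dragon", "master", "admin", "login", "passw0rd", "password1", "123456789",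
   "12345678", "iloveyou", "princess", "trustno1", "superman", "baseball"]

-- ===== PORT A =====
-- 'if not password: return False'; the for-loop with early 'return True' is List.any
def has_common_pattern (password : String) : Bool :=
  if password.toList.isEmpty then false
  else
    let password_lower := PySem.Str.lower password
    pvCommonPatterns.any (fun pattern => PySem.Str.isIn pattern password_lower)

-- ===== PORT B =====
-- the module-level build loop: _FIRST_INDEX.setdefault(pat[0], []).append(pat[1:])
-- (setdefault-then-append-in-place = modify with default [])
def pvFirstIndex : PySem.Dict Char (List (List Char)) :=
  pvCommonPatterns.foldl
    (fun d pat => d.modify (pat.toList.headD ' ') [] (· ++ [pat.toList.tail]))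
    PySem.Dict.empty

-- for i, c in enumerate(p): for tail in _FIRST_INDEX.get(c, []): if p.startswith(tail, i+1): return True
def has_common_pattern_alt (password : String) : Bool :=
  let p := (PySem.Str.lower password).toList
  (PySem.List.enumerate p).any (fun ic =>
    (pvFirstIndex.getD ic.2 []).any (fun tail =>
      PySem.Chars.startswith (p.drop (ic.1.toNat + 1)) tail))

-- ===== PRECONDITION & SPEC =====
def Spec_has_common_pattern (password : String) (out : Bool) : Prop := out = has_common_pattern_alt password
instance (password : String) (out : Bool) : Decidable (Spec_has_common_pattern password out) := by unfold Spec_has_common_pattern; infer_instance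

-- ===== CLAIM (what is proved, stated in full; the proofs are below) =====
def Claim_equal_has_common_pattern : Prop := ∀ (password : String), Dom_has_common_pattern password → Spec_has_common_pattern password (has_common_pattern password)

-- ===== LEMMAS AND PROOFS =====

lemma pv_cons_prefix_drop {p tail : List Char} {c : Char} {j : Nat} :
    (c :: tail <+: p.drop j) ↔ ∃ h : j < p.length, p[j] = c ∧ tail <+: p.drop (j+1) := by
  constructor
  · intro hpre
    have hj : j < p.length := by
      by_contra h
      have hnil : p.drop j = [] := List.drop_eq_nil_of_le (by omega)
      rw [hnil] at hpre
      exact absurd (List.prefix_nil.mp hpre) (by simp)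
    rw [← List.getElem_cons_drop hj, List.cons_prefix_cons] at hpre
    exact ⟨hj, hpre.1.symm, hpre.2⟩
  · rintro ⟨hj, hc, ht⟩
    rw [← List.getElem_cons_drop hj, List.cons_prefix_cons]
    exact ⟨hc.symm, ht⟩

lemma pvPatterns_nonempty : ∀ p ∈ pvCommonPatterns, p.toList ≠ [] := by decide

lemma pv_bucket_eq (c : Char) :
    pvFirstIndex.getD c []
      = ((pvCommonPatterns.map (fun pat => (pat.toList.headD ' ', pat.toList.tail))).filter
          (fun pr => pr.1 == c)).map (·.2) := by
  unfold pvFirstIndex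
  rw [show (pvCommonPatterns.foldl
        (fun d pat => d.modify (pat.toList.headD ' ') [] (· ++ [pat.toList.tail]))
        PySem.Dict.empty)
      = ((pvCommonPatterns.map (fun pat => (pat.toList.headD ' ', pat.toList.tail))).foldl
          (fun d pr => d.modify pr.1 [] (· ++ [pr.2])) PySem.Dict.empty) from by
    rw [List.foldl_map]]
  rw [PySem.Dict.getD_foldl_modify_append]
  simp [PySem.Dict.getD_empty]

lemma pv_bucket_iff (c : Char) (tail : List Char) :
    tail ∈ pvFirstIndex.getD c [] ↔ (c :: tail) ∈ pvCommonPatterns.map String.toList := by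
  rw [pv_bucket_eq]
  simp only [List.mem_map, List.mem_filter, List.mem_map, beq_iff_eq]
  constructor
  · rintro ⟨pr, ⟨⟨pat, hpat, rfl⟩, hc⟩, rfl⟩
    refine ⟨pat, hpat, ?_⟩
    rcases hl : pat.toList with _ | ⟨h, t⟩
    · exact absurd hl (pvPatterns_nonempty pat hpat)
    · simp only [hl, List.headD_cons, List.tail_cons] at hc ⊢
      rw [hc]
  · rintro ⟨pat, hpat, hl⟩
    exact ⟨(c, tail), ⟨⟨pat, hpat, by rw [hl]; simp⟩, rfl⟩, rfl⟩

lemma pv_scan_iff (p : List Char) :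
    (pvCommonPatterns.any (fun pattern => PySem.Chars.isIn pattern.toList p))
      = (PySem.List.enumerate p).any (fun ic =>
          (pvFirstIndex.getD ic.2 []).any (fun tail =>
            PySem.Chars.startswith (p.drop (ic.1.toNat + 1)) tail)) := by
  rw [Bool.eq_iff_iff]
  simp only [List.any_eq_true, PySem.List.mem_enumerate_iff, PySem.Chars.startswith_iff]
  constructor
  · rintro ⟨pat, hpat, hin⟩
    obtain ⟨j, hpre⟩ := (PySem.Chars.exists_prefix_drop_iff_isIn pat.toList p).mpr hin
    rcases hl : pat.toList with _ | ⟨c, tail⟩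
    · exact absurd hl (pvPatterns_nonempty pat hpat)
    rw [hl] at hpre
    obtain ⟨hj, hc, ht⟩ := pv_cons_prefix_drop.mp hpre
    refine ⟨((j : Int), p[j]), ⟨j, hj, by simp⟩, tail, (pv_bucket_iff _ _).mpr ?_, by simpa using ht⟩
    rw [hc]
    exact List.mem_map.mpr ⟨pat, hpat, hl⟩
  · rintro ⟨ic, ⟨k, hk, rfl⟩, tail, hmem, hpre⟩
    obtain ⟨pat, hpat, hl⟩ := List.mem_map.mp ((pv_bucket_iff _ _).mp hmem)
    refine ⟨pat, hpat, (PySem.Chars.exists_prefix_drop_iff_isIn pat.toList p).mp ⟨k, ?_⟩⟩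
    rw [hl]
    exact pv_cons_prefix_drop.mpr ⟨hk, rfl, by simpa using hpre⟩

-- ===== VERDICT (by name: the statement is the Claim_ definition above) =====
theorem has_common_pattern_spec : Claim_equal_has_common_pattern := by
  intro password _
  unfold Spec_has_common_pattern has_common_pattern has_common_pattern_alt
  by_cases h : password.toList = []
  · simp [h, PySem.Str.lower, PySem.Chars.lower]
  · simp only [List.isEmpty_eq_false_iff.mpr h]
    exact pv_scan_iff (PySem.Str.lower password).toList
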